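-- pv_equiv track=rewrite | github.com/YingZhou001/Immuannot-vdj | src.v0.08/fmt-rm-intron.py | merge_ele
-- ===== SOURCE A (Python) =====
-- def merge_ele(ele_arr) :
--     new_arr = []
--     for x,fro,to in ele_arr :
--         if not new_arr : new_arr.append([x, fro, to])
--         else :
--             if fro <= new_arr[-1][2] + 1 :
--                 new_arr[-1][0] += '~' + x
--                 new_arr[-1][2] = max(new_arr[-1][2], to)
--             else :
--                 new_arr.append([x, fro, to])
--     ele_clust = []
--     for x,fro,to in new_arr :
--         ele_clust.append(x.split('~'))
--     return(ele_clust)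
-- ===== SOURCE B (Python) =====
-- def merge_ele(ele_arr):
--     # Stage 1: compute only the cluster start indices (no label handling at all).
--     starts, end = [], None
--     for i, (_, fro, to) in enumerate(ele_arr):
--         if end is None or fro > end + 1:
--             starts.append(i)
--             end = to
--         else:
--             end = max(end, to)
--     bounds = starts + [len(ele_arr)]
--     # Stage 2: for each [s, e) window, flatten the labels of its elements.
--     return [[lab for x, _, _ in ele_arr[s:e] for lab in x.split('~')]
--             for s, e in zip(bounds, bounds[1:])]
-- ===== Notes on version B (the rewrite author's own statement) =====
-- stated objective: alternative
-- what changed: B works in two staged passes over different data: pass 1 computes only the cluster start indices (never touching labels), then B slices the input at those boundaries and flattens each window's split labels, whereas A merges in one accumulator pass that grows '~'-joined cluster strings and then re-splits them in a second pass.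
import Mathlib
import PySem

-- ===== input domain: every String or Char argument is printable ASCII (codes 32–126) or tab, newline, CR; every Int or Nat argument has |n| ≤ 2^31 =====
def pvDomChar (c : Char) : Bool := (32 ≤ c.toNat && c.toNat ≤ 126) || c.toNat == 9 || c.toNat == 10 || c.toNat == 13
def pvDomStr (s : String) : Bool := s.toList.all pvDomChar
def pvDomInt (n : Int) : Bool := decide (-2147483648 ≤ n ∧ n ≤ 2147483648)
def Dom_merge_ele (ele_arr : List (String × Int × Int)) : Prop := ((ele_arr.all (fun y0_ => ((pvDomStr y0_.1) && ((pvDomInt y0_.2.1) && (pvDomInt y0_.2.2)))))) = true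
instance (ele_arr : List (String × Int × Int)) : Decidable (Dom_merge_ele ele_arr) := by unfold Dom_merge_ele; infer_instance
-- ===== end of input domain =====

-- B replaces A's single accumulator pass building '~'-joined cluster strings (plus a
-- second split pass) by two staged passes: first compute only the cluster start
-- indices, then slice the input at those boundaries and flatten each window's labels
-- (objective: alternative decomposition).

-- x.split('~') (sep nonempty, so Python's split never raises); used by both versions
def pySplitTilde (s : String) : List String :=
  (PySem.Chars.splitOn s.toList ['~']).map String.ofList

-- ===== PORT A =====
-- loop body of A's first pass: append, or merge into new_arr[-1]
def mergeStepA (acc : List (String × Int × Int)) (e : String × Int × Int) :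
    List (String × Int × Int) :=
  match acc.getLast? with
  | none => acc ++ [e]
  | some (s, f, t) =>
      if e.2.1 ≤ t + 1 then acc.dropLast ++ [(s ++ "~" ++ e.1, f, max t e.2.2)]
      else acc ++ [e]

def merge_ele (ele_arr : List (String × Int × Int)) : List (List String) :=
  let new_arr := ele_arr.foldl mergeStepA []
  new_arr.map (fun y => pySplitTilde y.1)

-- ===== PORT B =====
-- stage-1 loop body: state = (start indices so far, current cluster end or None)
def stageStep (st : List Int × Option Int) (ie : Int × (String × Int × Int)) :
    List Int × Option Int :=
  match st.2 with
  | none => (st.1 ++ [ie.1], some ie.2.2.2)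
  | some e =>
      if ie.2.2.1 > e + 1 then (st.1 ++ [ie.1], some ie.2.2.2)
      else (st.1, some (max e ie.2.2.2))

-- labels of slice ele_arr[a:b], flattened (the inner comprehension of Source B)
def sliceLabels (arr : List (String × Int × Int)) (a b : Int) : List String :=
  (PySem.List.slice arr (some a) (some b)).flatMap (fun y => pySplitTilde y.1)

-- the outer comprehension of Source B: one label list per consecutive bounds pair
def windowLabels (arr : List (String × Int × Int)) (bounds : List Int) :
    List (List String) :=
  (bounds.zip bounds.tail).map (fun p => sliceLabels arr p.1 p.2)

def merge_ele_alt (ele_arr : List (String × Int × Int)) : List (List String) :=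
  let st := (PySem.List.enumerate ele_arr).foldl stageStep ([], none)
  windowLabels ele_arr (st.1 ++ [(ele_arr.length : Int)])

-- ===== PRECONDITION & SPEC =====
def Spec_merge_ele (ele_arr : List (String × Int × Int)) (out : List (List String)) : Prop := out = merge_ele_alt ele_arr
instance (ele_arr : List (String × Int × Int)) (out : List (List String)) : Decidable (Spec_merge_ele ele_arr out) := by unfold Spec_merge_ele; infer_instance

-- ===== CLAIM (what is proved, stated in full; the proofs are below) =====
def Claim_equal_merge_ele : Prop := ∀ (ele_arr : List (String × Int × Int)), Dom_merge_ele ele_arr → Spec_merge_ele ele_arr (merge_ele ele_arr)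

-- ===== LEMMAS AND PROOFS =====

-- PySem's fuel-based splitOn with a one-char separator is Mathlib's splitOnP
theorem splitOnGo_eq (c : Char) :
    ∀ (fuel : Nat) (l cur : List Char) (acc : List (List Char)), l.length < fuel →
      PySem.Chars.splitOn.go [c] fuel l cur acc =
        acc.reverse ++ (l.splitOnP (· == c)).modifyHead (cur.reverse ++ ·) := by
  intro fuel
  induction fuel with
  | zero => intro l cur acc h; omega
  | succ f ih =>
    intro l cur acc h
    cases l with
    | nil =>
      rw [PySem.Chars.splitOn.go.eq_def]
      simp [List.splitOnP_nil]
    | cons x rest =>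
      rw [PySem.Chars.splitOn.go.eq_def]
      simp only []
      by_cases hx : c = x
      · subst hx
        have hpre : List.isPrefixOf [c] (c :: rest) = true := by
          simp [List.isPrefixOf]
        rw [if_pos hpre]
        have : List.drop (List.length [c]) (c :: rest) = rest := by simp
        rw [this, ih rest [] (cur.reverse :: acc) (by simp at h ⊢; omega)]
        simp only [List.splitOnP_cons, beq_self_eq_true, if_pos, List.reverse_cons,
          List.append_assoc, List.singleton_append]
        cases List.splitOnP (fun x => x == c) rest <;> simp [List.modifyHead]
      · have hpre : List.isPrefixOf [c] (x :: rest) = false := by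
          simp [List.isPrefixOf]; intro hc; exact absurd hc hx
        rw [if_neg (by simp [hpre])]
        rw [ih rest (x :: cur) acc (by simp at h ⊢; omega)]
        have hb : (x == c) = false := by
          simp; intro hc; exact hx hc.symm
        simp only [List.splitOnP_cons, hb, Bool.false_eq_true, if_neg, not_false_iff,
          List.modifyHead_modifyHead]
        have hfun : (fun x_1 => (x :: cur).reverse ++ x_1) =
            ((fun x => cur.reverse ++ x) ∘ List.cons x) := by
          funext a; simp
        rw [hfun]

theorem splitOn_eq_splitOnP (c : Char) (l : List Char) :
    PySem.Chars.splitOn l [c] = l.splitOnP (· == c) := by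
  rw [PySem.Chars.splitOn, splitOnGo_eq c (l.length + 1) l [] [] (by omega)]
  cases List.splitOnP (fun x => x == c) l <;> simp [List.modifyHead]

-- splitting a '~'-joined string = concatenation of the splits
theorem pySplitTilde_append (s x : String) :
    pySplitTilde (s ++ "~" ++ x) = pySplitTilde s ++ pySplitTilde x := by
  unfold pySplitTilde
  have h1 : (s ++ "~" ++ x).toList = s.toList ++ '~' :: x.toList := by
    simp [String.toList_append]
  rw [h1, splitOn_eq_splitOnP, splitOn_eq_splitOnP, splitOn_eq_splitOnP,
    List.splitOnP_append_cons _ _ _ '~' (by simp), List.map_append]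

-- appending a bound adds one window, from the previous last bound
theorem zip_tail_concat (m j : Int) :
    ∀ (l : List Int),
      (l ++ [m, j]).zip (l ++ [m, j]).tail
        = (l ++ [m]).zip (l ++ [m]).tail ++ [(m, j)] := by
  intro l
  induction l with
  | nil => simp
  | cons b l' ih =>
    cases l' with
    | nil => simp
    | cons c l'' =>
      simp only [List.cons_append, List.tail_cons, List.zip_cons_cons] at ih ⊢
      rw [ih]

theorem windowLabels_concat (arr : List (String × Int × Int)) (l : List Int)
    (m j : Int) :
    windowLabels arr ((l ++ [m]) ++ [j]) =
      windowLabels arr (l ++ [m]) ++ [sliceLabels arr m j] := by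
  unfold windowLabels
  have h : (l ++ [m]) ++ [j] = l ++ [m, j] := by simp
  rw [h, zip_tail_concat m j l, List.map_append]
  rfl

-- slice lemmas for natural bounds
theorem sliceLabels_extend (arr : List (String × Int × Int)) (m i : Nat)
    (x : String × Int × Int) (hm : m ≤ i) (hx : arr.drop i = x :: (arr.drop (i + 1))) :
    sliceLabels arr (m : Int) ((i : Int) + 1) =
      sliceLabels arr (m : Int) (i : Int) ++ pySplitTilde x.1 := by
  unfold sliceLabels
  have h1 : ((i : Int) + 1) = (((i + 1 : Nat)) : Int) := by push_cast; ring
  rw [h1, PySem.List.slice_natCast, PySem.List.slice_natCast]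
  have h2 : i + 1 - m = (i - m) + 1 := by omega
  have h3 : (arr.drop m)[i - m]? = some x := by
    rw [List.getElem?_drop]
    have : m + (i - m) = i := by omega
    rw [this, ← List.head?_drop, hx]
    rfl
  rw [h2, List.take_add_one, h3, List.flatMap_append]
  simp

theorem sliceLabels_single (arr : List (String × Int × Int)) (i : Nat)
    (x : String × Int × Int) (hx : arr.drop i = x :: (arr.drop (i + 1))) :
    sliceLabels arr (i : Int) ((i : Int) + 1) = pySplitTilde x.1 := by
  unfold sliceLabels
  have h1 : ((i : Int) + 1) = (((i + 1 : Nat)) : Int) := by push_cast; ring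
  rw [h1, PySem.List.slice_natCast]
  have h2 : i + 1 - i = 1 := by omega
  rw [h2, hx]
  simp [List.take_add_one]

-- the main loop invariant: A's accumulator vs B's (starts, end) state
theorem loop_eq (arr : List (String × Int × Int)) :
    ∀ (l : List (String × Int × Int)) (i m : Nat) (SB0 : List Int)
      (pre : List (String × Int × Int)) (s : String) (f t : Int),
      arr.drop i = l → i ≤ arr.length → m ≤ i →
      windowLabels arr (SB0 ++ [(m : Int)]) = pre.map (fun y => pySplitTilde y.1) →
      sliceLabels arr (m : Int) (i : Int) = pySplitTilde s →
      (l.foldl mergeStepA (pre ++ [(s, f, t)])).map (fun y => pySplitTilde y.1)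
        = windowLabels arr
            (((PySem.List.enumerate l (i : Int)).foldl stageStep
                (SB0 ++ [(m : Int)], some t)).1 ++ [(arr.length : Int)]) := by
  intro l
  induction l with
  | nil =>
    intro i m SB0 pre s f t hl hi hm h1 h2
    have hin : i = arr.length := by
      have := List.drop_eq_nil_iff.mp hl
      omega
    rw [PySem.List.enumerate_nil]
    simp only [List.foldl_nil]
    rw [windowLabels_concat arr SB0 (m : Int) (arr.length : Int)]
    rw [h1, ← hin, h2, List.map_append]
    rfl
  | cons e rest ih =>
    intro i m SB0 pre s f t hl hi hm h1 h2
    obtain ⟨x, f2, t2⟩ := e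
    have hi' : i < arr.length := by
      by_contra hc
      rw [List.drop_eq_nil_iff.mpr (by omega)] at hl
      simp at hl
    have hrest : arr.drop (i + 1) = rest := by
      rw [← List.drop_drop, hl]
      rfl
    have hx : arr.drop i = (x, f2, t2) :: arr.drop (i + 1) := by
      rw [hl, hrest]
    rw [PySem.List.enumerate_cons]
    simp only [List.foldl_cons]
    have hA : mergeStepA (pre ++ [(s, f, t)]) (x, f2, t2) =
        if f2 ≤ t + 1 then pre ++ [(s ++ "~" ++ x, f, max t t2)]
        else (pre ++ [(s, f, t)]) ++ [(x, f2, t2)] := by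
      simp [mergeStepA]
    have hB : stageStep (SB0 ++ [(m : Int)], some t) ((i : Int), (x, f2, t2)) =
        if f2 > t + 1 then (SB0 ++ [(m : Int)] ++ [(i : Int)], some t2)
        else (SB0 ++ [(m : Int)], some (max t t2)) := by
      simp [stageStep]
    rw [hA, hB]
    by_cases hc : f2 ≤ t + 1
    · rw [if_pos hc, if_neg (by omega)]
      have h2' : sliceLabels arr (m : Int) ((i + 1 : Nat) : Int) =
          pySplitTilde (s ++ "~" ++ x) := by
        have := sliceLabels_extend arr m i (x, f2, t2) hm hx
        rw [pySplitTilde_append]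
        push_cast
        rw [this, h2]
      have := ih (i + 1) m SB0 pre (s ++ "~" ++ x) f (max t t2) hrest (by omega)
        (by omega) h1 h2'
      push_cast at this ⊢
      exact this
    · rw [if_neg hc, if_pos (by omega)]
      have h1' : windowLabels arr ((SB0 ++ [(m : Int)]) ++ [(i : Int)]) =
          (pre ++ [(s, f, t)]).map (fun y => pySplitTilde y.1) := by
        rw [windowLabels_concat arr SB0 (m : Int) (i : Int)]
        rw [h1, h2, List.map_append]
        rfl
      have h2' : sliceLabels arr ((i : Nat) : Int) ((i + 1 : Nat) : Int) =
          pySplitTilde x := by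
        have := sliceLabels_single arr i (x, f2, t2) hx
        push_cast
        exact this
      have := ih (i + 1) i (SB0 ++ [(m : Int)]) (pre ++ [(s, f, t)]) x f2 t2
        hrest (by omega) (by omega) h1' h2'
      push_cast at this ⊢
      exact this

-- ===== VERDICT (by name: the statement is the Claim_ definition above) =====
theorem merge_ele_spec : Claim_equal_merge_ele := by
  intro ele_arr _
  unfold Spec_merge_ele merge_ele merge_ele_alt
  cases ele_arr with
  | nil => simp [PySem.List.enumerate_nil, windowLabels]
  | cons e rest =>
    obtain ⟨x, f2, t2⟩ := e
    rw [show ((0:Int)) = ((0 : Nat) : Int) from rfl, PySem.List.enumerate_cons]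
    simp only [List.foldl_cons]
    have hA : mergeStepA [] (x, f2, t2) = [] ++ [(x, f2, t2)] := by
      simp [mergeStepA]
    have hB : stageStep ([], none) (((0 : Nat) : Int), (x, f2, t2)) =
        (([] : List Int) ++ [((0 : Nat) : Int)], some t2) := by
      simp [stageStep]
    rw [hA, hB]
    have h1 : windowLabels ((x, f2, t2) :: rest) ([] ++ [((0 : Nat) : Int)]) =
        ([] : List (String × Int × Int)).map (fun y => pySplitTilde y.1) := by
      simp [windowLabels]
    have h2 : sliceLabels ((x, f2, t2) :: rest) ((0 : Nat) : Int) ((1 : Nat) : Int) =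
        pySplitTilde x := by
      have := sliceLabels_single ((x, f2, t2) :: rest) 0 (x, f2, t2) (by simp)
      push_cast at this ⊢
      exact this
    have := loop_eq ((x, f2, t2) :: rest) rest 1 0 [] [] x f2 t2 (by rfl)
      (by simp) (by omega) h1 h2
    push_cast at this ⊢
    simpa using this
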